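-- pv_equiv track=rewrite | github.com/amitsharma001/utils | CalendarAgentPython/calendar_agent.py | parse_selection
-- ===== SOURCE A (Python) =====
-- from typing import Dict, List, Tuple
--
-- def parse_selection(user_input: str, max_idx: int) -> List[int]:
--     """Parse space-separated slot numbers into 0-based indices. Deduplicates."""
--     indices, seen = [], set()
--     for token in user_input.strip().split():
--         try:
--             n = int(token)
--             if 1 <= n <= max_idx and n not in seen:
--                 indices.append(n - 1)
--                 seen.add(n)
--         except ValueError:
--             pass
--     return indices
-- ===== SOURCE B (Python) =====
-- def parse_selection(user_input: str, max_idx: int):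
--     """Parse space-separated slot numbers into 0-based indices. Deduplicates."""
--     vals = []
--     for token in user_input.strip().split():
--         try:
--             n = int(token)
--         except ValueError:
--             continue
--         if 1 <= n <= max_idx:
--             vals.append(n)
--     return [n - 1 for i, n in enumerate(vals) if n not in vals[:i]]
-- ===== Notes on version B (the rewrite author's own statement) =====
-- stated objective: alternative
-- what changed: B drops A's seen-set entirely: it first collects the in-range parsed values, then keeps each value whose prefix vals[:i] does not already contain it (quadratic prefix-membership dedup) and converts to 0-based in a final comprehension.
import Mathlib
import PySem

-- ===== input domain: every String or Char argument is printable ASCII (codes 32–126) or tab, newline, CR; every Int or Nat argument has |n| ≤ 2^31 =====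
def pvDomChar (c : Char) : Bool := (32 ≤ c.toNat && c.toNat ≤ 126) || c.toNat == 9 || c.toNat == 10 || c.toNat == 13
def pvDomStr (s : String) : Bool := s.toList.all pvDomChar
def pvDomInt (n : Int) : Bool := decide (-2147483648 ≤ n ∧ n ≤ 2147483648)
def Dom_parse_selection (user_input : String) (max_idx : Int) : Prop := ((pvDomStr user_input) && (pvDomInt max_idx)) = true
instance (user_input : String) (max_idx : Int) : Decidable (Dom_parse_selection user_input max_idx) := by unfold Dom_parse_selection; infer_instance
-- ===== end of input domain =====

-- B drops A's seen-set: it first collects the in-range parsed values, then dedups by prefix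
-- membership (n ∉ vals[:i]) in a final comprehension; alternative decomposition, not faster.

-- ===== PORT A =====
def parse_selection (user_input : String) (max_idx : Int) : List Int :=
  ((PySem.Str.split₀ (PySem.Str.strip user_input)).foldl
    (fun (st : List Int × PySem.Set Int) token =>
      match PySem.Int.ofStr? token with
      | some n =>
          if 1 ≤ n ∧ n ≤ max_idx ∧ PySem.Set.contains st.2 n = false then
            (st.1 ++ [n - 1], PySem.Set.add st.2 n)
          else st
      | none => st)
    ([], PySem.Set.empty)).1

-- ===== PORT B =====
def parse_selection_alt (user_input : String) (max_idx : Int) : List Int :=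
  let vals : List Int :=
    (PySem.Str.split₀ (PySem.Str.strip user_input)).foldl
      (fun acc token =>
        match PySem.Int.ofStr? token with
        | some n => if 1 ≤ n ∧ n ≤ max_idx then acc ++ [n] else acc
        | none => acc) []
  ((PySem.List.enumerate vals 0).filter
      (fun p => decide (p.2 ∉ PySem.List.slice vals none (some p.1)))).map
    (fun p => p.2 - 1)

-- ===== PRECONDITION & SPEC =====
def Spec_parse_selection (user_input : String) (max_idx : Int) (out : List Int) : Prop := out = parse_selection_alt user_input max_idx
instance (user_input : String) (max_idx : Int) (out : List Int) : Decidable (Spec_parse_selection user_input max_idx out) := by unfold Spec_parse_selection; infer_instance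

-- ===== CLAIM =====
def Claim_equal_parse_selection : Prop := ∀ (user_input : String) (max_idx : Int), Dom_parse_selection user_input max_idx → Spec_parse_selection user_input max_idx (parse_selection user_input max_idx)

-- ===== LEMMAS AND PROOFS =====

-- the in-range values named by the token list, in order, with repetitions
def pvVals (max_idx : Int) (toks : List String) : List Int :=
  toks.filterMap (fun t =>
    match PySem.Int.ofStr? t with
    | some n => if 1 ≤ n ∧ n ≤ max_idx then some n else none
    | none => none)

-- first-occurrence dedup relative to an already-seen list
def pvG (s : List Int) : List Int → List Int
  | [] => []
  | n :: ns => if n ∈ s then pvG s ns else n :: pvG (s ++ [n]) ns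

theorem pvVals_cons_none (max_idx : Int) (t : String) (ts : List String)
    (h : PySem.Int.ofStr? t = none) : pvVals max_idx (t :: ts) = pvVals max_idx ts := by
  simp only [pvVals, List.filterMap_cons, h]

theorem pvVals_cons_in (max_idx n : Int) (t : String) (ts : List String)
    (h : PySem.Int.ofStr? t = some n) (hr : 1 ≤ n ∧ n ≤ max_idx) :
    pvVals max_idx (t :: ts) = n :: pvVals max_idx ts := by
  simp only [pvVals, List.filterMap_cons, h]
  rw [if_pos hr]

theorem pvVals_cons_out (max_idx n : Int) (t : String) (ts : List String)
    (h : PySem.Int.ofStr? t = some n) (hr : ¬ (1 ≤ n ∧ n ≤ max_idx)) :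
    pvVals max_idx (t :: ts) = pvVals max_idx ts := by
  simp only [pvVals, List.filterMap_cons, h]
  rw [if_neg hr]

theorem pvContains_iff (s : List Int) (n : Int) :
    PySem.Set.contains s n = false ↔ n ∉ s := by
  simp [PySem.Set.contains]

theorem pvFoldB_eq (max_idx : Int) (toks : List String) (acc : List Int) :
    toks.foldl (fun acc token =>
        match PySem.Int.ofStr? token with
        | some n => if 1 ≤ n ∧ n ≤ max_idx then acc ++ [n] else acc
        | none => acc) acc = acc ++ pvVals max_idx toks := by
  induction toks generalizing acc with
  | nil => simp [pvVals]
  | cons t ts ih =>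
    simp only [List.foldl_cons]
    cases h : PySem.Int.ofStr? t with
    | none => rw [pvVals_cons_none max_idx t ts h]; exact ih acc
    | some n =>
      dsimp only
      by_cases hr : 1 ≤ n ∧ n ≤ max_idx
      · rw [if_pos hr, pvVals_cons_in max_idx n t ts h hr, ih (acc ++ [n]),
          List.append_assoc]
        rfl
      · rw [if_neg hr, pvVals_cons_out max_idx n t ts h hr]; exact ih acc

theorem pvFoldA_eq (max_idx : Int) (toks : List String) (out s : List Int) :
    (toks.foldl (fun (st : List Int × PySem.Set Int) token =>
        match PySem.Int.ofStr? token with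
        | some n =>
            if 1 ≤ n ∧ n ≤ max_idx ∧ PySem.Set.contains st.2 n = false then
              (st.1 ++ [n - 1], PySem.Set.add st.2 n)
            else st
        | none => st) (out, s)).1
    = out ++ (pvG s (pvVals max_idx toks)).map (fun n => n - 1) := by
  induction toks generalizing out s with
  | nil => simp [pvVals, pvG]
  | cons t ts ih =>
    simp only [List.foldl_cons]
    cases h : PySem.Int.ofStr? t with
    | none => rw [pvVals_cons_none max_idx t ts h]; exact ih out s
    | some n =>
      dsimp only
      by_cases hr : 1 ≤ n ∧ n ≤ max_idx
      · rw [pvVals_cons_in max_idx n t ts h hr]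
        by_cases hc : n ∈ s
        · have hcond : ¬ (1 ≤ n ∧ n ≤ max_idx ∧ PySem.Set.contains s n = false) := by
            intro hcon; exact ((pvContains_iff s n).mp hcon.2.2) hc
          rw [if_neg hcond, pvG, if_pos hc]
          exact ih out s
        · have hcond : 1 ≤ n ∧ n ≤ max_idx ∧ PySem.Set.contains s n = false :=
            ⟨hr.1, hr.2, (pvContains_iff s n).mpr hc⟩
          rw [if_pos hcond]
          rw [show PySem.Set.add s n = s ++ [n] from by
            simp [PySem.Set.add, PySem.Set.contains, hc]]
          rw [ih (out ++ [n - 1]) (s ++ [n]), pvG, if_neg hc, List.map_cons,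
            List.append_assoc]
          rfl
      · rw [pvVals_cons_out max_idx n t ts h hr]
        have hcond : ¬ (1 ≤ n ∧ n ≤ max_idx ∧ PySem.Set.contains s n = false) := by
          intro hcon; exact hr ⟨hcon.1, hcon.2.1⟩
        rw [if_neg hcond]
        exact ih out s

-- appending one element to the input of pvG
theorem pvG_append_single (xs : List Int) (s : List Int) (a : Int) :
    pvG s (xs ++ [a]) = pvG s xs ++ (if a ∈ s ∨ a ∈ xs then [] else [a]) := by
  induction xs generalizing s with
  | nil => by_cases h : a ∈ s <;> simp [pvG, h]
  | cons x xs' ih =>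
    simp only [List.cons_append, pvG, List.mem_cons]
    by_cases hx : x ∈ s
    · rw [if_pos hx, if_pos hx, ih s]
      by_cases ha : a = x
      · subst ha; simp [hx]
      · simp [ha]
    · rw [if_neg hx, if_neg hx, ih (s ++ [x]), List.cons_append]
      have hmem : (a ∈ s ++ [x] ∨ a ∈ xs') ↔ (a ∈ s ∨ a = x ∨ a ∈ xs') := by
        simp [List.mem_append, or_assoc]
      simp only [hmem]

-- B's prefix-membership comprehension computes first-occurrence dedup
theorem pvB_core (xs : List Int) :
    ((PySem.List.enumerate xs 0).filter
        (fun p => decide (p.2 ∉ PySem.List.slice xs none (some p.1)))).map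
      (fun p => p.2 - 1) = (pvG [] xs).map (fun n => n - 1) := by
  induction xs using List.reverseRecOn with
  | nil => simp [pvG, PySem.List.enumerate]
  | append_singleton xs a ih =>
    rw [PySem.List.enumerate_append]
    simp only [List.filter_append, List.map_append]
    have h1 : (PySem.List.enumerate xs 0).filter
        (fun p => decide (p.2 ∉ PySem.List.slice (xs ++ [a]) none (some p.1)))
        = (PySem.List.enumerate xs 0).filter
        (fun p => decide (p.2 ∉ PySem.List.slice xs none (some p.1))) := by
      apply List.filter_congr
      intro p hp
      rcases (PySem.List.mem_enumerate_iff xs 0 p).mp hp with ⟨k, hk, rfl⟩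
      simp only [zero_add, PySem.List.slice_to_natCast,
        List.take_append_of_le_length (le_of_lt hk)]
    rw [h1]
    have h2 : PySem.List.enumerate [a] (0 + (xs.length : Int))
        = [((xs.length : Int), a)] := by
      simp [PySem.List.enumerate]
    rw [h2]
    have h3 : PySem.List.slice (xs ++ [a]) none (some (xs.length : Int))
        = xs := by
      rw [PySem.List.slice_to_natCast]
      exact List.take_left
    rw [pvG_append_single xs [] a]
    simp only [List.not_mem_nil, false_or]
    by_cases ha : a ∈ xs
    · rw [ih]
      simp [h3, ha]
    · rw [ih]
      simp [h3, ha]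

-- ===== VERDICT (by name: the statement is the Claim_ definition above) =====
theorem parse_selection_spec : Claim_equal_parse_selection := by
  intro user_input max_idx _
  unfold Spec_parse_selection parse_selection parse_selection_alt
  rw [pvFoldA_eq]
  simp only [pvFoldB_eq, List.nil_append]
  rw [pvB_core]
  rfl
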